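-- pv_equiv track=rewrite | github.com/legojrp/IUPUI-Math-Challenge | justGraph.py | constructOperationsMatrix
-- ===== SOURCE A (Python) =====
-- def constructOperationsMatrix(n):
--     submatrix = []
--     nTest = None #Binary counting number
--     nLen = len(str(n)) #Length of n
--     nBin = int(bin(2**(nLen-2)),2) #
--     for i in range(0,2**(nLen-2)):
--
--         if nTest == None:#Only does this once
--             nTest = nBin
--         nCut = str(bin(nTest)).replace('0b1','')#Replaces binary ID of string so we just get the 1's and 0's.
--         nCutList = list(nCut) #Turns the string of 1s and 0s into a list
--
--         for i in range(len(nCut)):#Swaps + for 1, - for 0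
--
--             if nCutList[i] == '1':
--                 nCutList[i] = '+'
--             elif nCutList[i] == '0':
--                 nCutList[i] = '-'
--         for i in range(len(nCutList)+1):
--             submatrix.append(nCutList[:])
--         nTest = nTest + 1
--     for i in range(0,(len(nCutList)+1)*(2**(nLen-2))):
--         submatrix[i].insert((i % (len(nCutList)+1)),'==')
--     return submatrix
-- ===== SOURCE B (Python) =====
-- def signPatterns(k):
--     # all length-k '+'/'-' patterns, '-' first (counting order, MSB first)
--     if k <= 0:
--         return [[]]
--     return [[c] + p for c in '-+' for p in signPatterns(k - 1)]
--
--
-- def insertEq(xs):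
--     # every way to insert '==' into xs, left position first
--     if not xs:
--         return [['==']]
--     return [['=='] + xs] + [[xs[0]] + r for r in insertEq(xs[1:])]
--
--
-- def constructOperationsMatrix(n):
--     k = len(str(n)) - 2
--     return [row for p in signPatterns(k) for row in insertEq(p)]
-- ===== Notes on version B (the rewrite author's own statement) =====
-- stated objective: simpler
-- what changed: B is a recursive combinatorial construction: signPatterns(k) builds the '+'/'-' patterns by structural recursion (Cartesian product, prepending a sign to each shorter pattern) and insertEq(xs) enumerates all '=='-insertions of a list by recursion on the list, the result being their flat product; A instead counts an integer through a padded binary range, formats it with bin()/replace, swaps characters in place, duplicates each row k+1 times and mutates rows by a global-index-modulo pass.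
-- outside the precondition, e.g. on constructOperationsMatrix(1): A raises TypeError, B returns [['==']]; on constructOperationsMatrix(5): A raises TypeError, B returns [['==']]
import Mathlib
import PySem

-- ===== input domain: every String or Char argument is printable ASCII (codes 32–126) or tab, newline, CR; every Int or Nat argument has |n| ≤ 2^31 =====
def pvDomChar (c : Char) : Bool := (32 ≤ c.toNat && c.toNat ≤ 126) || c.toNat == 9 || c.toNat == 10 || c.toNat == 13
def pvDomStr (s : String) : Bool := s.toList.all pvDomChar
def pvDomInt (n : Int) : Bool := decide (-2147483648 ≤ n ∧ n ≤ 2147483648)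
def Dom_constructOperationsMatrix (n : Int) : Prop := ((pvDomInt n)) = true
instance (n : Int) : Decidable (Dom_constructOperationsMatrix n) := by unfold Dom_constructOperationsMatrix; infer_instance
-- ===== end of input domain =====

-- B builds the rows by structural recursion (Cartesian product of signs, then recursive
-- '=='-insertion), replacing A's binary counting / bin()-string pipeline and its
-- duplicate-then-mutate two-phase build; objective: simpler (no speed claim).

-- ===== PORT A =====
/-- Body of A's `for i in range(0, 2**(nLen-2))` loop; the state is the Python variables
(submatrix, nTest, nCutList). `nTest == None` is modelled by `Option Int`. -/
def pvStepA (nBin : Int) (st : List (List String) × Option Int × List String) (_i : Int) :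
    List (List String) × Option Int × List String :=
  let nTest : Int := match st.2.1 with | none => nBin | some t => t  -- if nTest == None: nTest = nBin
  let nCut : String := PySem.Str.replace (PySem.Int.pyBin nTest) "0b1" ""  -- str(bin(nTest)).replace('0b1','')
  let nCutList0 : List String := nCut.toList.map (fun c => String.ofList [c])  -- list(nCut)
  let nCutList : List String := (PySem.List.pyRange 0 (PySem.Str.len nCut) 1).foldl  -- for i in range(len(nCut))
      (fun l i => if PySem.List.pyGetD l i "" = "1" then PySem.List.pySetD l i "+"
                  else if PySem.List.pyGetD l i "" = "0" then PySem.List.pySetD l i "-" else l) nCutList0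
  let sm : List (List String) := (PySem.List.pyRange 0 (PySem.List.len nCutList + 1) 1).foldl
      (fun sm _ => sm ++ [nCutList]) st.1  -- for i in range(len(nCutList)+1): submatrix.append(nCutList[:])
  (sm, some (nTest + 1), nCutList)

def constructOperationsMatrix (n : Int) : List (List String) :=
  let nLen : Int := PySem.Str.len (PySem.Int.toStr n)  -- len(str(n))
  -- 2**(nLen-2): for nLen < 2 Python's float exponent makes range() raise TypeError (outside
  -- Pre_), so the value of `.toNat` there is irrelevant
  let k : Nat := (nLen - 2).toNat
  let nBin : Int := (PySem.Int.ofStrBase? (PySem.Int.pyBin ((2 : Int) ^ k)) 2).getD 0  -- int(bin(2**(nLen-2)),2)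
  let st := (PySem.List.pyRange 0 ((2 : Int) ^ k) 1).foldl (pvStepA nBin)
      (([], none, []) : List (List String) × Option Int × List String)
  -- for i in range(0,(len(nCutList)+1)*(2**(nLen-2))): submatrix[i].insert(i % (len(nCutList)+1),'==')
  (PySem.List.pyRange 0 ((PySem.List.len st.2.2 + 1) * (2 : Int) ^ k) 1).foldl
    (fun sm i => PySem.List.pySetD sm i
      (PySem.List.insert (PySem.List.pyGetD sm i []) (PySem.Int.mod i (PySem.List.len st.2.2 + 1)) "==")) st.1

-- ===== PORT B =====
/-- `signPatterns(k)`: all length-k '+'/'-' patterns, '-' branch first, by recursion on k. -/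
def pvSignPatterns : Nat → List (List String)
  | 0 => [[]]                            -- if k <= 0: return [[]]
  | k + 1 => ["-", "+"].flatMap (fun c => (pvSignPatterns k).map (fun p => c :: p))

/-- `insertEq(xs)`: every way to insert '==' into xs, leftmost position first, by recursion on xs. -/
def pvInsertEq : List String → List (List String)
  | [] => [["=="]]
  | x :: t => ("==" :: x :: t) :: (pvInsertEq t).map (fun r => x :: r)

def constructOperationsMatrix_alt (n : Int) : List (List String) :=
  let k : Nat := (PySem.Str.len (PySem.Int.toStr n) - 2).toNat  -- k = len(str(n)) - 2
  (pvSignPatterns k).flatMap pvInsertEq  -- [row for p in signPatterns(k) for row in insertEq(p)]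

-- ===== PRECONDITION & SPEC =====
-- Pre_ excludes exactly the single-digit non-negative n (len(str(n)) < 2), where Python A
-- raises TypeError ('float' object cannot be interpreted as an integer).
def Pre_constructOperationsMatrix (n : Int) : Prop := n < 0 ∨ 10 ≤ n
instance (n : Int) : Decidable (Pre_constructOperationsMatrix n) := by
  unfold Pre_constructOperationsMatrix; infer_instance
def pvWitness_constructOperationsMatrix : Int := 123

def Spec_constructOperationsMatrix (n : Int) (out : List (List String)) : Prop :=
  out = constructOperationsMatrix_alt n
instance (n : Int) (out : List (List String)) : Decidable (Spec_constructOperationsMatrix n out) := by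
  unfold Spec_constructOperationsMatrix; infer_instance

-- ===== CLAIM (what is proved, stated in full; the proofs are below) =====
def Claim_equal_constructOperationsMatrix : Prop := ∀ (n : Int), Dom_constructOperationsMatrix n →
  Pre_constructOperationsMatrix n → Spec_constructOperationsMatrix n (constructOperationsMatrix n)

-- ===== LEMMAS AND PROOFS =====

/-- The bit pattern of `i` written with `k` binary digits. -/
def pvBits (k i : Nat) : List Char :=
  (List.range k).map (fun j => if (i >>> (k - 1 - j)) &&& 1 == 1 then '1' else '0')

/-- The sign row at counter value `i`, to which A's char-swap loop evaluates. -/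
def pvRow (k i : Nat) : List String :=
  (List.range k).map (fun j => if (i >>> (k - 1 - j)) &&& 1 == 1 then "+" else "-")

/-- A's `'1'→'+' / '0'→'-'` swap as a function on one element. -/
def pvSwapF (v : String) : String := if v = "1" then "+" else if v = "0" then "-" else v

lemma pvRow_length (k i : Nat) : (pvRow k i).length = k := by simp [pvRow]

lemma pvBits_succ (k i : Nat) :
    pvBits (k + 1) i = pvBits k (i / 2) ++ [if i &&& 1 == 1 then '1' else '0'] := by
  simp only [pvBits, List.range_succ, List.map_append, List.map_cons, List.map_nil]
  congr 1
  · apply List.map_congr_left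
    intro j hj
    simp only [List.mem_range] at hj
    have h1 : k + 1 - 1 - j = (k - 1 - j) + 1 := by omega
    rw [h1, Nat.add_comm (k - 1 - j) 1, Nat.shiftRight_add, Nat.shiftRight_one]
  · have : k + 1 - 1 - k = 0 := by omega
    rw [this, Nat.shiftRight_zero]

lemma pvToDigitsCore (k : Nat) : ∀ (i f : Nat) (acc : List Char), i < 2 ^ k → 2 ^ k + i < f →
    Nat.toDigitsCore 2 f (2 ^ k + i) acc = '1' :: (pvBits k i ++ acc) := by
  induction k with
  | zero =>
    intro i f acc hi hf
    interval_cases i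
    match f, hf with
    | f + 1, _ => simp [Nat.toDigitsCore, Nat.digitChar, pvBits]
  | succ k ih =>
    intro i f acc hi hf
    have h2 : 0 < 2 ^ k := Nat.two_pow_pos k
    match f, hf with
    | f + 1, hf =>
      have hdiv : (2 ^ (k + 1) + i) / 2 = 2 ^ k + i / 2 := by
        rw [Nat.pow_succ, Nat.mul_comm]; omega
      have hmod : (2 ^ (k + 1) + i) % 2 = i % 2 := by
        have : 2 ^ (k + 1) % 2 = 0 := by simp [Nat.pow_succ]
        omega
      have hne : (2 ^ (k + 1) + i) / 2 ≠ 0 := by rw [hdiv]; omega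
      rw [Nat.toDigitsCore]
      simp only [hdiv, hmod]
      rw [if_neg (hdiv ▸ hne)]
      have hpow : 2 ^ (k + 1) = 2 ^ k * 2 := by ring
      rw [hpow] at hf
      rw [ih (i / 2) f _ (by omega) (by omega)]
      rw [pvBits_succ]
      have : Nat.digitChar (i % 2) = if i &&& 1 == 1 then '1' else '0' := by
        rw [Nat.and_one_is_mod]
        rcases Nat.mod_two_eq_zero_or_one i with h | h <;> simp [h, Nat.digitChar]
      simp [this]

lemma pvToDigits (k i : Nat) (hi : i < 2 ^ k) :
    Nat.toDigits 2 (2 ^ k + i) = '1' :: pvBits k i := by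
  rw [Nat.toDigits]
  rw [pvToDigitsCore k i _ [] hi (by omega)]
  simp

lemma pvBits_no_b (k i : Nat) : 'b' ∉ pvBits k i := by
  intro h
  simp only [pvBits, List.mem_map] at h
  obtain ⟨j, -, hj⟩ := h
  split at hj <;> exact absurd hj (by decide)

lemma pvReplaceGo : ∀ (rest : List Char) (f : Nat) (acc : List Char), rest.length ≤ f → 'b' ∉ rest →
    PySem.Chars.replace.go ['0', 'b', '1'] [] f rest acc = acc.reverse ++ rest := by
  intro rest
  induction rest with
  | nil =>
    intro f acc _ _
    cases f <;> simp [PySem.Chars.replace.go]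
  | cons c t ih =>
    intro f acc hf hb
    match f, hf with
    | f + 1, hf =>
      rw [PySem.Chars.replace.go]
      have hpre : List.isPrefixOf ['0', 'b', '1'] (c :: t) = false := by
        match t with
        | [] => simp [List.isPrefixOf]
        | d :: t' =>
          have hd : ('b' == d) = false := by
            have : d ≠ 'b' := fun h => hb (by simp [h])
            simpa using Ne.symm this
          simp [List.isPrefixOf, hd]
      simp only [hpre, Bool.false_eq_true, if_false]
      rw [ih f (c :: acc) (by simpa using Nat.lt_succ_iff.mp (by simpa using hf))
            (fun h => hb (List.mem_cons_of_mem _ h))]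
      simp

lemma pvReplace (rest : List Char) (hb : 'b' ∉ rest) :
    PySem.Chars.replace ('0' :: 'b' :: '1' :: rest) ['0', 'b', '1'] [] = rest := by
  rw [PySem.Chars.replace]
  simp only [List.isEmpty_cons, Bool.false_eq_true, if_false]
  rw [show (('0' :: 'b' :: '1' :: rest : List Char)).length = rest.length + 1 + 1 + 1 from rfl]
  rw [PySem.Chars.replace.go]
  have hpre : List.isPrefixOf ['0', 'b', '1'] ('0' :: 'b' :: '1' :: rest) = true := by
    simp [List.isPrefixOf]
  simp only [hpre, if_true]
  rw [show List.drop ['0','b','1'].length ('0' :: 'b' :: '1' :: rest) = rest from rfl]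
  rw [show ([] : List Char).reverse ++ [] = [] from rfl]
  rw [pvReplaceGo rest (rest.length + 2) [] (by omega) hb]
  simp

lemma pvBinChars (k i : Nat) (hi : i < 2 ^ k) :
    PySem.Int.toBinChars0b ((2 : Int) ^ k + (i : Int)) = '0' :: 'b' :: '1' :: pvBits k i := by
  have hlt : ¬((2 : Int) ^ k + (i : Int) < 0) := by
    have h0 : (0 : Int) ≤ (2 : Int) ^ k + (i : Int) := by positivity
    omega
  rw [PySem.Int.toBinChars0b, if_neg hlt]
  have htn : ((2 : Int) ^ k + (i : Int)).toNat = 2 ^ k + i := by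
    have : (2 : Int) ^ k = ((2 ^ k : Nat) : Int) := by push_cast; ring
    omega
  rw [htn, pvToDigits k i hi]

lemma pvFoldlSet {α : Type} (h : Nat → α → α) (d : α) : ∀ (m j : Nat) (l : List α), j + m = l.length →
    (List.range' j m).foldl (fun s i => s.set i (h i (s.getD i d))) l
      = l.take j ++ (l.drop j).mapIdx (fun t a => h (j + t) a) := by
  intro m
  induction m with
  | zero =>
    intro j l hj
    have hj' : j = l.length := by omega
    simp [hj']
  | succ m ih =>
    intro j l hj
    have hjl : j < l.length := by omega
    rw [List.range'_succ, List.foldl_cons]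
    set v := h j (l.getD j d) with hv
    rw [ih (j + 1) (l.set j v) (by simp; omega)]
    have hgd : l.getD j d = l[j] := List.getD_eq_getElem l d hjl
    have hdrop : (l.set j v).drop (j + 1) = l.drop (j + 1) := by
      rw [List.drop_set]; simp
    have hlen : (l.take j).length = j := by simp [Nat.le_of_lt hjl]
    have htake : (l.set j v).take (j + 1) = l.take j ++ [v] := by
      rw [List.take_set, List.take_add_one, List.getElem?_eq_getElem hjl]
      rw [show Option.toList (some l[j]) = [l[j]] from rfl]
      rw [List.set_append]
      simp [hlen]
    rw [hdrop, htake]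
    have hfe : (fun (t : Nat) (a : α) => h (j + (t + 1)) a) = (fun t a => h (j + 1 + t) a) := by
      funext t a; congr 1; omega
    rw [List.drop_eq_getElem_cons hjl, List.mapIdx_cons, hfe]
    rw [hgd] at hv
    simp [hv]

lemma pvMapIdxConst {α β : Type} (f : α → β) : ∀ l : List α,
    l.mapIdx (fun _ a => f a) = l.map f := by
  intro l
  induction l with
  | nil => rfl
  | cons x xs ih => simp only [List.mapIdx_cons, List.map_cons, ih]

lemma pvSetForm {α : Type} (h : Nat → α → α) (d : α) (l : List α) (m : Nat)
    (step : List α → Nat → List α)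
    (hstep : ∀ (s : List α) (i : Nat), step s i = s.set i (h i (s.getD i d))) :
    (List.range m).foldl step l = (List.range' 0 m).foldl (fun s i => s.set i (h i (s.getD i d))) l := by
  rw [List.range_eq_range']
  apply PySem.List.foldl_congr_mem
  intro acc x _
  exact hstep acc x

lemma pvSwapLoop (cs : List Char) :
    (PySem.List.pyRange 0 (cs.length : Int) 1).foldl
      (fun l i => if PySem.List.pyGetD l i "" = "1" then PySem.List.pySetD l i "+"
                  else if PySem.List.pyGetD l i "" = "0" then PySem.List.pySetD l i "-" else l)
      (cs.map (fun c => String.ofList [c]))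
    = (cs.map (fun c => String.ofList [c])).map pvSwapF := by
  set l0 := cs.map (fun c => String.ofList [c]) with hl0
  have hlen : l0.length = cs.length := by simp [hl0]
  rw [PySem.List.pyRange_one]
  simp only [Int.sub_zero, Int.toNat_natCast, List.foldl_map]
  have hstep : ∀ (s : List String) (i : Nat),
      (if PySem.List.pyGetD s ((0 : Int) + i) "" = "1" then PySem.List.pySetD s ((0 : Int) + i) "+"
       else if PySem.List.pyGetD s ((0 : Int) + i) "" = "0" then PySem.List.pySetD s ((0 : Int) + i) "-" else s)
      = s.set i (pvSwapF (s.getD i "")) := by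
    intro s i
    have h0 : ((0 : Int) + i) = (i : Int) := by omega
    rw [h0, PySem.List.pyGetD_natCast, PySem.List.pySetD_natCast, PySem.List.pySetD_natCast]
    unfold pvSwapF
    by_cases h1 : s.getD i "" = "1"
    · rw [if_pos h1, if_pos h1]
    · rw [if_neg h1, if_neg h1]
      by_cases h2 : s.getD i "" = "0"
      · rw [if_pos h2, if_pos h2]
      · rw [if_neg h2, if_neg h2]
        by_cases hi : i < s.length
        · rw [List.getD_eq_getElem s "" hi, List.set_getElem_self hi]
        · rw [List.set_eq_of_length_le (by omega)]
  rw [pvSetForm (fun _ v => pvSwapF v) "" l0 cs.length _ hstep]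
  have h2 := pvFoldlSet (fun _ v => pvSwapF v) "" cs.length 0 l0 (by omega)
  beta_reduce at h2
  rw [h2]
  simp [pvMapIdxConst]

lemma pvRowFromBits (k i : Nat) :
    ((pvBits k i).map (fun c => String.ofList [c])).map pvSwapF = pvRow k i := by
  simp only [pvBits, pvRow, List.map_map]
  apply List.map_congr_left
  intro j _
  simp only [Function.comp_apply]
  by_cases hb : (i >>> (k - 1 - j) &&& 1 == 1) = true
  · rw [if_pos hb, if_pos hb]; decide
  · rw [if_neg hb, if_neg hb]; decide

lemma pvAppendLoop (r : List String) (S : List (List String)) :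
    (PySem.List.pyRange 0 (PySem.List.len r + 1) 1).foldl (fun sm _ => sm ++ [r]) S
    = S ++ List.replicate (r.length + 1) r := by
  rw [PySem.List.len_eq, PySem.List.pyRange_one]
  rw [show (((r.length : Int) + 1 - 0)).toNat = r.length + 1 by omega]
  rw [List.foldl_map]
  rw [PySem.List.foldl_append_singleton_eq_map]
  congr 1
  rw [List.map_const']
  simp

lemma pvStepA_spec (nb : Int) (k i : Nat) (hi : i < 2 ^ k)
    (S : List (List String)) (o : Option Int) (r : List String) (j : Int)
    (ho : (match o with | none => nb | some t => t) = (2 : Int) ^ k + i) :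
    pvStepA nb (S, o, r) j
    = (S ++ List.replicate (k + 1) (pvRow k i), some ((2 : Int) ^ k + i + 1), pvRow k i) := by
  unfold pvStepA
  simp only [ho]
  have hcut : (PySem.Str.replace (PySem.Int.pyBin ((2 : Int) ^ k + (i : Int))) "0b1" "").toList
      = pvBits k i := by
    rw [PySem.Str.toList_replace]
    rw [show (PySem.Int.pyBin ((2 : Int) ^ k + (i : Int))).toList
        = PySem.Int.toBinChars0b ((2 : Int) ^ k + (i : Int)) from by simp [PySem.Int.pyBin]]
    rw [pvBinChars k i hi]
    rw [show ("0b1" : String).toList = ['0', 'b', '1'] from rfl,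
        show ("" : String).toList = [] from rfl]
    exact pvReplace _ (pvBits_no_b k i)
  have hlen : PySem.Str.len (PySem.Str.replace (PySem.Int.pyBin ((2 : Int) ^ k + (i : Int))) "0b1" "")
      = ((pvBits k i).length : Int) := by
    rw [PySem.Str.len_eq, hcut]
  rw [hlen, hcut, pvSwapLoop, pvRowFromBits]
  rw [pvAppendLoop]
  rw [pvRow_length]

lemma pvPhase1 (k : Nat) (nb : Int) (hnb : nb = (2 : Int) ^ k) : ∀ j : Nat, j ≤ 2 ^ k →
    (PySem.List.pyRange 0 (j : Int) 1).foldl (pvStepA nb)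
      (([], none, []) : List (List String) × Option Int × List String)
    = ((List.range j).flatMap (fun i => List.replicate (k + 1) (pvRow k i)),
       if j = 0 then none else some ((2 : Int) ^ k + j),
       if j = 0 then [] else pvRow k (j - 1)) := by
  intro j
  induction j with
  | zero => intro _; rw [PySem.List.pyRange_one_eq_nil (by omega)]; simp
  | succ j ih =>
    intro hj
    have hcast : ((j + 1 : Nat) : Int) = (j : Int) + 1 := by push_cast; ring
    rw [hcast, PySem.List.pyRange_one_succ_right (by omega), List.foldl_append]
    rw [ih (by omega)]
    rw [List.foldl_cons, List.foldl_nil]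
    rw [pvStepA_spec nb k j (by omega) _ _ _ _ ?_]
    · rw [List.range_succ, List.flatMap_append]
      simp only [List.flatMap_cons, List.flatMap_nil, List.append_nil]
      simp only [Prod.mk.injEq]
      refine ⟨trivial, ?_, ?_⟩
      · simp only [Nat.succ_ne_zero, if_false]
        ring_nf
      · simp
    · by_cases h0 : j = 0
      · subst h0; simp [hnb]
      · simp only [h0, if_false]

lemma pvMapIdxReplicate {α β : Type} : ∀ (m : Nat) (f : Nat → α → β) (a : α),
    (List.replicate m a).mapIdx f = (List.range m).map (fun p => f p a) := by
  intro m
  induction m with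
  | zero => intro f a; rfl
  | succ m ih =>
    intro f a
    rw [List.replicate_succ, List.mapIdx_cons, ih, List.range_succ_eq_map, List.map_cons, List.map_map]
    rfl

lemma pvBlockLen (k : Nat) (N : Nat) :
    ((List.range N).flatMap (fun i => List.replicate (k + 1) (pvRow k i))).length = N * (k + 1) := by
  rw [List.length_flatMap]
  simp [List.map_const', List.sum_replicate]

lemma pvBlocks (k : Nat) (q : Nat → List String → List String) : ∀ N : Nat,
    ((List.range N).flatMap (fun i => List.replicate (k + 1) (pvRow k i))).mapIdx
        (fun t row => q (t % (k + 1)) row)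
      = (List.range N).flatMap (fun i => (List.range (k + 1)).map (fun p => q p (pvRow k i))) := by
  intro N
  induction N with
  | zero => rfl
  | succ N ih =>
    rw [List.range_succ, List.flatMap_append, List.flatMap_append, List.mapIdx_append, ih]
    congr 1
    simp only [List.flatMap_cons, List.flatMap_nil, List.append_nil]
    rw [pvBlockLen k N, pvMapIdxReplicate]
    apply List.map_congr_left
    intro p hp
    rw [List.mem_range] at hp
    congr 1
    rw [Nat.add_mul_mod_self_right, Nat.mod_eq_of_lt hp]

lemma pvPhase2 (k : Nat) (S : List (List String)) (hS : S.length = 2 ^ k * (k + 1)) :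
    (PySem.List.pyRange 0 (((k : Int) + 1) * ((2 ^ k : Nat) : Int)) 1).foldl
      (fun sm i => PySem.List.pySetD sm i
        (PySem.List.insert (PySem.List.pyGetD sm i []) (PySem.Int.mod i ((k : Int) + 1)) "==")) S
    = S.mapIdx (fun t row => PySem.List.insert row ((t % (k + 1) : Nat) : Int) "==") := by
  have hc : ((k : Int) + 1) * ((2 ^ k : Nat) : Int) = (((k + 1) * 2 ^ k : Nat) : Int) := by
    push_cast; ring
  have hT : (((k : Int) + 1) * ((2 ^ k : Nat) : Int) - 0).toNat = S.length := by
    rw [hc, Int.sub_zero, Int.toNat_natCast, hS, Nat.mul_comm]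
  rw [PySem.List.pyRange_one, hT, List.foldl_map]
  have hstep : ∀ (s : List (List String)) (i : Nat),
      PySem.List.pySetD s ((0 : Int) + i)
        (PySem.List.insert (PySem.List.pyGetD s ((0 : Int) + i) [])
          (PySem.Int.mod ((0 : Int) + i) ((k : Int) + 1)) "==")
      = s.set i ((fun t row => PySem.List.insert row ((t % (k + 1) : Nat) : Int) "==") i (s.getD i [])) := by
    intro s i
    have h0 : ((0 : Int) + i) = (i : Int) := by omega
    have h1 : ((k : Int) + 1) = ((k + 1 : Nat) : Int) := by push_cast; ring
    rw [h0, h1, PySem.List.pyGetD_natCast, PySem.List.pySetD_natCast, PySem.Int.mod_natCast]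
  rw [pvSetForm (fun t row => PySem.List.insert row ((t % (k + 1) : Nat) : Int) "==") [] S S.length _ hstep]
  have h2 := pvFoldlSet (fun t row => PySem.List.insert row ((t % (k + 1) : Nat) : Int) "==") []
    S.length 0 S (by omega)
  beta_reduce at h2
  rw [h2]
  simp

-- B-side characterisations

lemma pvInsertEq_eq : ∀ xs : List String,
    pvInsertEq xs = (List.range (xs.length + 1)).map (fun p => xs.take p ++ "==" :: xs.drop p) := by
  intro xs
  induction xs with
  | nil => rfl
  | cons x t ih =>
    rw [pvInsertEq, ih]
    conv_rhs => rw [List.range_succ_eq_map]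
    simp only [List.map_cons, List.map_map]
    congr 1

lemma pvBitShift (k s i : Nat) (hs : s < k) :
    ((2 ^ k + i) >>> s) &&& 1 = (i >>> s) &&& 1 := by
  rw [Nat.shiftRight_eq_div_pow, Nat.shiftRight_eq_div_pow, Nat.and_one_is_mod, Nat.and_one_is_mod]
  have h1 : 2 ^ k = 2 ^ s * 2 ^ (k - s) := by rw [← pow_add]; congr 1; omega
  rw [h1, Nat.mul_add_div (Nat.two_pow_pos s)]
  have h2 : 2 ^ (k - s) = 2 * 2 ^ (k - s - 1) := by
    rw [← pow_succ']; congr 1; omega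
  rw [h2, Nat.add_comm, Nat.add_mul_mod_self_left]

lemma pvRow_succ_lo (k m : Nat) (hm : m < 2 ^ k) : pvRow (k + 1) m = "-" :: pvRow k m := by
  rw [pvRow, List.range_succ_eq_map, List.map_cons, List.map_map]
  congr 1
  · have hhi : m >>> k = 0 := by
      rw [Nat.shiftRight_eq_div_pow]
      exact Nat.div_eq_of_lt hm
    simp [hhi]
  · rw [pvRow]
    apply List.map_congr_left
    intro j _
    simp only [Function.comp_apply]
    have hs : k + 1 - 1 - (j + 1) = k - 1 - j := by omega
    rw [hs]

lemma pvRow_succ_hi (k i : Nat) (hi : i < 2 ^ k) : pvRow (k + 1) (2 ^ k + i) = "+" :: pvRow k i := by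
  rw [pvRow, List.range_succ_eq_map, List.map_cons, List.map_map]
  congr 1
  · have hhi : (2 ^ k + i) >>> k = 1 := by
      rw [Nat.shiftRight_eq_div_pow, Nat.add_comm, Nat.add_div_right _ (Nat.two_pow_pos k),
        Nat.div_eq_of_lt hi]
    simp [hhi]
  · rw [pvRow]
    apply List.map_congr_left
    intro j hj
    rw [List.mem_range] at hj
    simp only [Function.comp_apply]
    have h1 : k + 1 - 1 - (j + 1) = k - 1 - j := by omega
    rw [h1, pvBitShift k (k - 1 - j) i (by omega)]

lemma pvSignPatterns_eq : ∀ k : Nat, pvSignPatterns k = (List.range (2 ^ k)).map (pvRow k) := by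
  intro k
  induction k with
  | zero => simp [pvSignPatterns, pvRow]
  | succ k ih =>
    rw [pvSignPatterns, ih]
    simp only [List.flatMap_cons, List.flatMap_nil, List.append_nil, List.map_map]
    have hsplit : 2 ^ (k + 1) = 2 ^ k + 2 ^ k := by ring
    rw [hsplit, List.range_add, List.map_append, List.map_map]
    congr 1
    · apply List.map_congr_left
      intro m hm
      rw [List.mem_range] at hm
      exact (pvRow_succ_lo k m hm).symm
    · apply List.map_congr_left
      intro i hi
      rw [List.mem_range] at hi
      simpa using (pvRow_succ_hi k i hi).symm

lemma pvFlatMapMap {α β γ : Type} (f : α → β) (g : β → List γ) : ∀ l : List α,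
    (l.map f).flatMap g = l.flatMap (fun a => g (f a)) := by
  intro l
  induction l with
  | nil => rfl
  | cons x t ih => simp [List.flatMap_cons, ih]

lemma pvNBin (k : Nat) (hk : k ≤ 9) :
    (PySem.Int.ofStrBase? (PySem.Int.pyBin ((2 : Int) ^ k)) 2).getD 0 = (2 : Int) ^ k := by
  interval_cases k <;> decide

lemma pvKBound (n : Int) (hd : pvDomInt n = true) :
    (PySem.Str.len (PySem.Int.toStr n) - 2).toNat ≤ 9 := by
  simp only [pvDomInt, decide_eq_true_eq] at hd
  rw [PySem.Str.len_eq, PySem.Int.toList_toStr]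
  have hbound : ∀ m : Nat, m ≤ 2147483648 → (Nat.toDigits 10 m).length ≤ 10 := by
    intro m hm
    exact Nat.toDigits_length 10 m 10 (by norm_num) (by omega)
  have habs : n.natAbs ≤ 2147483648 := by omega
  rw [PySem.Int.toChars]
  by_cases hneg : n < 0
  · rw [if_pos hneg]
    have := hbound n.natAbs habs
    simp only [List.length_cons]
    omega
  · rw [if_neg hneg]
    have h1 : n.toNat ≤ 2147483648 := by omega
    have := hbound n.toNat h1
    omega

-- ===== VERDICT (by name: the statement is the Claim_ definition above) =====
theorem constructOperationsMatrix_spec : Claim_equal_constructOperationsMatrix := by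
  intro n hd _hpre
  unfold Spec_constructOperationsMatrix constructOperationsMatrix constructOperationsMatrix_alt
  have hk9 : (PySem.Str.len (PySem.Int.toStr n) - 2).toNat ≤ 9 := pvKBound n hd
  set k : Nat := (PySem.Str.len (PySem.Int.toStr n) - 2).toNat with hkdef
  clear hkdef
  simp only []
  rw [pvNBin k hk9]
  have hcast : ((2 : Int) ^ k) = ((2 ^ k : Nat) : Int) := by push_cast; ring
  rw [hcast]
  have h2k : 2 ^ k ≠ 0 := (Nat.two_pow_pos k).ne'
  rw [pvPhase1 k (((2 ^ k : Nat) : Int)) hcast.symm (2 ^ k) le_rfl]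
  dsimp only
  rw [if_neg h2k]
  simp only [PySem.List.len_eq, pvRow_length]
  rw [pvPhase2 k _ (pvBlockLen k (2 ^ k))]
  have hblocks := pvBlocks k (fun p row => PySem.List.insert row ((p : Nat) : Int) "==") (2 ^ k)
  beta_reduce at hblocks
  rw [hblocks]
  rw [pvSignPatterns_eq k, pvFlatMapMap]
  congr 1
  funext i
  rw [pvInsertEq_eq (pvRow k i), pvRow_length]
  apply List.map_congr_left
  intro p hp
  rw [List.mem_range] at hp
  rw [PySem.List.insert_natCast _ p _ (by rw [pvRow_length]; omega)]
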